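-- pv_equiv track=rewrite | github.com/daniel-reich/ubiquitous-fiesta | 6vSZmN66xhMRDX8YT_11.py | advanced_sort
-- ===== SOURCE A (Python) =====
-- def advanced_sort(lst):
--   d = dict()
--   order = []
--   items = set()
--   for item in lst:
--     d[item] = []
--     if item not in items:
--       order.append(item)
--     items.add(item)
--
--   for item in lst:
--     d[item].append(item)
--
--   lsts = []
--   for key in order:
--     lsts.append(d[key])
--   return lsts
-- ===== SOURCE B (Python) =====
-- def advanced_sort(lst):
--   seen = []
--   for x in lst:
--     if x not in seen:
--       seen.append(x)
--   return [[x for x in lst if x == k] for k in seen]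
-- ===== Notes on version B (the rewrite author's own statement) =====
-- stated objective: simpler
-- what changed: B drops A's dict/order-list/set machinery entirely: it dedups the list by membership scan and builds each group by filtering the list for that key (nested filters instead of dict-based accumulation).
import Mathlib
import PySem

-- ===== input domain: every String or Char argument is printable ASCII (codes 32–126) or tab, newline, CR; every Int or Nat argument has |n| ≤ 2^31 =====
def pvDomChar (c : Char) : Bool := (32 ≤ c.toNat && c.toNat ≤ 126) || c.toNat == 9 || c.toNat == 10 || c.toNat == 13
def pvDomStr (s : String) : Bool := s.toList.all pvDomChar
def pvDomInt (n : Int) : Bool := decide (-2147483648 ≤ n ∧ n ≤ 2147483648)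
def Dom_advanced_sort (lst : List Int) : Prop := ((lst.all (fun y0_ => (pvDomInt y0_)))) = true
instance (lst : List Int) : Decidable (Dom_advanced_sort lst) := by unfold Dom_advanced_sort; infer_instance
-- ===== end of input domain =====

-- B drops A's dict/order-list/set machinery: it dedups the list by membership scan
-- (first occurrences) and builds each group by filtering the list for that key; simpler.

-- ===== PORT A =====
-- first loop carries (d, order, items); the two later loops only read keys the first loop
-- inserted, so d[item].append / d[key] are ported with getD (exact: the key is present)
def advanced_sort (lst : List Int) : List (List Int) :=
  let s := lst.foldl
    (fun (s : PySem.Dict Int (List Int) × List Int × PySem.Set Int) item =>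
      let d := s.1.insert item []
      let order := if PySem.Set.contains s.2.2 item then s.2.1 else s.2.1 ++ [item]
      let items := PySem.Set.add s.2.2 item
      (d, order, items))
    (PySem.Dict.empty, [], PySem.Set.empty)
  let d := lst.foldl (fun d item => d.modify item [] (· ++ [item])) s.1
  s.2.1.foldl (fun lsts key => lsts ++ [d.getD key []]) []

-- ===== PORT B =====
def advanced_sort_alt (lst : List Int) : List (List Int) :=
  let seen := lst.foldl (fun (s : List Int) x => if s.contains x then s else s ++ [x]) []
  seen.map (fun k => lst.filter (fun x => x == k))

-- ===== PRECONDITION & SPEC =====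
def Spec_advanced_sort (lst : List Int) (out : List (List Int)) : Prop := out = advanced_sort_alt lst
instance (lst : List Int) (out : List (List Int)) : Decidable (Spec_advanced_sort lst out) := by unfold Spec_advanced_sort; infer_instance

-- ===== CLAIM (what is proved, stated in full; the proofs are below) =====
def Claim_equal_advanced_sort : Prop := ∀ (lst : List Int), Dom_advanced_sort lst → Spec_advanced_sort lst (advanced_sort lst)

-- ===== LEMMAS AND PROOFS =====

-- A's first loop: with order = items initially, the two stay equal and accumulate Set.add;
-- the dict component is an independent insert-[] loop.
theorem pvA_loop1 (lst : List Int) (d : PySem.Dict Int (List Int)) (o : List Int) :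
    lst.foldl
      (fun (s : PySem.Dict Int (List Int) × List Int × PySem.Set Int) item =>
        (s.1.insert item [],
         if PySem.Set.contains s.2.2 item then s.2.1 else s.2.1 ++ [item],
         PySem.Set.add s.2.2 item))
      (d, o, o)
    = (lst.foldl (fun d x => d.insert x ([] : List Int)) d,
       PySem.Set.update o lst, PySem.Set.update o lst) := by
  induction lst generalizing d o with
  | nil => simp [PySem.Set.update]
  | cons x xs ih =>
      simp only [List.foldl_cons, PySem.Set.update_cons]
      rw [← ih]
      rfl

-- after the insert-[] loop every key reads [] (with default []), provided it did before
theorem pvA_insertNil_getD (lst : List Int) (d : PySem.Dict Int (List Int))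
    (h : ∀ k, d.getD k [] = []) (k : Int) :
    (lst.foldl (fun d x => d.insert x ([] : List Int)) d).getD k [] = [] := by
  induction lst generalizing d with
  | nil => exact h k
  | cons x xs ih =>
      simp only [List.foldl_cons]
      exact ih _ (fun j => by rw [PySem.Dict.getD_insert]; split <;> simp [h])

-- the append loop (A's second loop) groups the occurrences of each key
theorem pv_append_loop (lst : List Int) (d : PySem.Dict Int (List Int)) (k : Int) :
    (lst.foldl (fun d x => d.modify x [] (· ++ [x])) d).getD k []
      = d.getD k [] ++ lst.filter (fun x => x == k) := by
  induction lst generalizing d with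
  | nil => simp
  | cons x xs ih =>
      simp only [List.foldl_cons, List.filter_cons]
      rw [ih, PySem.Dict.getD_modify]
      by_cases hx : x = k <;> simp [hx, beq_iff_eq]
      · intro h; exact absurd h.symm hx

-- the reference value both programs compute
theorem pvA_eq (lst : List Int) :
    advanced_sort lst
      = (PySem.Set.ofList lst).map (fun k => lst.filter (fun x => x == k)) := by
  unfold advanced_sort
  simp only []
  rw [show (PySem.Set.empty : PySem.Set Int) = [] from rfl,
    pvA_loop1 lst PySem.Dict.empty []]
  simp only [PySem.Set.update_nil_left, PySem.List.foldl_append_singleton_eq_map,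
    List.nil_append]
  refine List.map_congr_left (fun k _ => ?_)
  rw [pv_append_loop, pvA_insertNil_getD lst PySem.Dict.empty (fun j => by simp) k]
  simp

-- B's membership-scan dedup loop is literally Set.ofList (first occurrences, in order)
theorem pvB_eq (lst : List Int) :
    advanced_sort_alt lst
      = (PySem.Set.ofList lst).map (fun k => lst.filter (fun x => x == k)) := by
  unfold advanced_sort_alt
  rw [PySem.Set.ofList_eq_foldl]
  rfl

-- ===== VERDICT (by name: the statement is the Claim_ definition above) =====
theorem advanced_sort_spec : Claim_equal_advanced_sort := by
  intro lst _
  unfold Spec_advanced_sort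
  rw [pvA_eq, pvB_eq]
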